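-- pv_equiv track=rewrite | github.com/LuthienResearch/luthien-proxy | src/luthien_proxy/policies/string_replacement_policy.py | _detect_capitalization_pattern
-- ===== SOURCE A (Python) =====
-- def _detect_capitalization_pattern(text: str) -> str:
--     """Detect the capitalization pattern of a string.
--
--     Returns one of:
--     - "upper": all uppercase (e.g., "HELLO")
--     - "lower": all lowercase (e.g., "hello")
--     - "title": first char uppercase, rest lowercase (e.g., "Hello")
--     - "mixed": any other pattern (e.g., "hELLo")
--     """
--     if not text:
--         return "lower"
--
--     alpha_chars = [c for c in text if c.isalpha()]
--     if not alpha_chars: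
--         return "lower"
--
--     if all(c.isupper() for c in alpha_chars):
--         return "upper"
--     if all(c.islower() for c in alpha_chars):
--         return "lower"
--     if alpha_chars[0].isupper() and all(c.islower() for c in alpha_chars[1:]):
--         return "title"
--     return "mixed"
-- ===== SOURCE B (Python) =====
-- def _detect_capitalization_pattern(text: str) -> str:
--     seen = False
--     all_upper = True
--     all_lower = True
--     first_upper = False
--     rest_lower = True
--     for c in text:
--         if c.isalpha():
--             if not seen:
--                 seen = True
--                 all_upper = all_upper and c.isupper()
--                 all_lower = all_lower and c.islower()
--                 first_upper = c.isupper()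
--             else:
--                 all_upper = all_upper and c.isupper()
--                 all_lower = all_lower and c.islower()
--                 rest_lower = rest_lower and c.islower()
--     if not seen:
--         return "lower"
--     if all_upper:
--         return "upper"
--     if all_lower:
--         return "lower"
--     if first_upper and rest_lower:
--         return "title"
--     return "mixed"
-- ===== Notes on version B (the rewrite author's own statement) =====
-- stated objective: alternative
-- what changed: Replaces the intermediate alpha_chars list and the three separate all() scans with a single pass over text maintaining seen/all_upper/all_lower/first_upper/rest_lower flags, applying the same cascade afterwards.
import Mathlib
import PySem

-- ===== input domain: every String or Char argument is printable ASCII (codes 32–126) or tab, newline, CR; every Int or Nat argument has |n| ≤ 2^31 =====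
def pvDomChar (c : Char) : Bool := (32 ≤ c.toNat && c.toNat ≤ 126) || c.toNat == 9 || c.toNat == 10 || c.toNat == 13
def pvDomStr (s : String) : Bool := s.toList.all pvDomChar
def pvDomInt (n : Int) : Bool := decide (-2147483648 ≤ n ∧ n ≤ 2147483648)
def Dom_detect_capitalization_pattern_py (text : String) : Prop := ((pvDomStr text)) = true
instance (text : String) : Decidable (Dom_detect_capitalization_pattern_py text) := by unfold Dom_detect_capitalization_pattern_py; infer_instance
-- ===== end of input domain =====

-- B replaces A's alpha_chars list + three all() scans by one pass over text keeping five flags; alternative decomposition, same cost class.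

-- ===== PORT A =====
def detect_capitalization_pattern_py (text : String) : String :=
  if text.toList = [] then "lower" else
  let alpha_chars := text.toList.filter (fun c => PySem.Chars.isalpha c)
  if alpha_chars = [] then "lower" else
  if alpha_chars.all (fun c => PySem.Chars.isupper c) then "upper" else
  if alpha_chars.all (fun c => PySem.Chars.islower c) then "lower" else
  if PySem.Chars.isupper alpha_chars.headI && alpha_chars.tail.all (fun c => PySem.Chars.islower c) then "title" else
  "mixed"

-- ===== PORT B =====
structure CapSt where
  seen : Bool
  allU : Bool
  allL : Bool
  firstU : Bool
  restL : Bool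
  deriving DecidableEq, Repr

def capStep (s : CapSt) (c : Char) : CapSt :=
  if PySem.Chars.isalpha c then
    if !s.seen then
      { s with seen := true, allU := s.allU && PySem.Chars.isupper c,
               allL := s.allL && PySem.Chars.islower c, firstU := PySem.Chars.isupper c }
    else
      { s with allU := s.allU && PySem.Chars.isupper c,
               allL := s.allL && PySem.Chars.islower c,
               restL := s.restL && PySem.Chars.islower c }
  else s

def detect_capitalization_pattern_py_alt (text : String) : String :=
  let s := text.toList.foldl capStep ⟨false, true, true, false, true⟩
  if !s.seen then "lower" else
  if s.allU then "upper" else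
  if s.allL then "lower" else
  if s.firstU && s.restL then "title" else
  "mixed"

-- ===== PRECONDITION & SPEC =====
def Spec_detect_capitalization_pattern_py (text : String) (out : String) : Prop := out = detect_capitalization_pattern_py_alt text
instance (text : String) (out : String) : Decidable (Spec_detect_capitalization_pattern_py text out) := by unfold Spec_detect_capitalization_pattern_py; infer_instance

-- ===== CLAIM (what is proved, stated in full; the proofs are below) =====
def Claim_equal_detect_capitalization_pattern_py : Prop := ∀ (text : String), Dom_detect_capitalization_pattern_py text → Spec_detect_capitalization_pattern_py text (detect_capitalization_pattern_py text)

-- ===== LEMMAS AND PROOFS =====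

/-- The fold state after processing `l`, starting from an arbitrary state `s`,
    in terms of the alpha characters of `l`. -/
theorem capStep_foldl (l : List Char) : ∀ (s : CapSt),
    l.foldl capStep s =
      { seen := s.seen || !((l.filter (fun c => PySem.Chars.isalpha c)).isEmpty),
        allU := s.allU && (l.filter (fun c => PySem.Chars.isalpha c)).all (fun c => PySem.Chars.isupper c),
        allL := s.allL && (l.filter (fun c => PySem.Chars.isalpha c)).all (fun c => PySem.Chars.islower c),
        firstU := if s.seen then s.firstU else
          (match l.filter (fun c => PySem.Chars.isalpha c) with
            | [] => s.firstU
            | c :: _ => PySem.Chars.isupper c),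
        restL := if s.seen then
            s.restL && (l.filter (fun c => PySem.Chars.isalpha c)).all (fun c => PySem.Chars.islower c)
          else
            s.restL && (l.filter (fun c => PySem.Chars.isalpha c)).tail.all (fun c => PySem.Chars.islower c) } := by
  induction l with
  | nil =>
      intro s
      simp
  | cons c rest ih =>
      intro s
      by_cases hc : PySem.Chars.isalpha c = true
      · by_cases hs : s.seen = true
        · simp [List.foldl_cons, capStep, hc, hs, ih, Bool.and_assoc]
        · replace hs : s.seen = false := by simpa using hs
          simp [List.foldl_cons, capStep, hc, hs, ih, Bool.and_assoc]
      · replace hc : PySem.Chars.isalpha c = false := by simpa using hc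
        simp [List.foldl_cons, capStep, hc, ih]

theorem detect_eq (text : String) :
    detect_capitalization_pattern_py text = detect_capitalization_pattern_py_alt text := by
  unfold detect_capitalization_pattern_py detect_capitalization_pattern_py_alt
  rw [capStep_foldl]
  cases h : (text.toList.filter (fun c => PySem.Chars.isalpha c)) with
  | nil => simp
  | cons a as =>
      have hne : text.toList ≠ [] := by
        intro h0; rw [h0] at h; simp at h
      simp [hne, List.headI]

-- ===== VERDICT (by name: the statement is the Claim_ definition above) =====
theorem detect_capitalization_pattern_py_spec : Claim_equal_detect_capitalization_pattern_py := by
  intro text _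
  unfold Spec_detect_capitalization_pattern_py
  exact detect_eq text
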